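-- pv_equiv track=rewrite | github.com/CoderAnush/Compiling-Neural-Network-Models-Using-Automata-Theory | project/ir/generate_ir.py | graph_to_ir
-- ===== SOURCE A (Python) =====
-- from typing import Dict, List, Tuple
--
-- def graph_to_ir(adj: Dict[str, List[str]]) -> List[str]:
--     """Convert adjacency into textual IR list. Assumes linear chain graph.
--
--     Returns list of strings representing IR instructions.
--     """
--     mapping = {}
--     ir = []
--     counter = 1
--
--     # build linear order by walking from Input
--     curr = "Input"
--     while True:
--         # handle Input specially
--         if curr not in mapping:
--             mapping[curr] = f"%{counter}"
--             counter += 1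
--             ir.append(f"{mapping[curr]} = {curr}()" if curr == "Input" else f"{mapping[curr]} = {curr}({prev_reg})")
--         # move to next
--         nexts = adj.get(curr, [])
--         if not nexts:
--             break
--         prev_reg = mapping[curr]
--         curr = nexts[0]
--     return ir
-- ===== SOURCE B (Python) =====
-- def graph_to_ir(adj):
--     """Two-pass variant: first collect the linear order by walking the chain,
--     then emit the IR lines with index-based registers."""
--     order = []
--     curr = "Input"
--     while True:
--         order.append(curr)
--         nexts = adj.get(curr, [])
--         if not nexts:
--             break
--         curr = nexts[0]
--     ir = []
--     prev_reg = None
--     for i, node in enumerate(order):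
--         reg = f"%{i + 1}"
--         ir.append(f"{reg} = {node}()" if node == "Input" else f"{reg} = {node}({prev_reg})")
--         prev_reg = reg
--     return ir
-- ===== Notes on version B (the rewrite author's own statement) =====
-- stated objective: simpler
-- what changed: Replaces A's single loop threading a node-to-register dict, a counter and a lagging prev_reg with two plain passes: walk the chain once collecting the node order, then emit each line from its index (register = %(i+1), prev register = %i), so the dict and counter disappear.
import Mathlib
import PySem

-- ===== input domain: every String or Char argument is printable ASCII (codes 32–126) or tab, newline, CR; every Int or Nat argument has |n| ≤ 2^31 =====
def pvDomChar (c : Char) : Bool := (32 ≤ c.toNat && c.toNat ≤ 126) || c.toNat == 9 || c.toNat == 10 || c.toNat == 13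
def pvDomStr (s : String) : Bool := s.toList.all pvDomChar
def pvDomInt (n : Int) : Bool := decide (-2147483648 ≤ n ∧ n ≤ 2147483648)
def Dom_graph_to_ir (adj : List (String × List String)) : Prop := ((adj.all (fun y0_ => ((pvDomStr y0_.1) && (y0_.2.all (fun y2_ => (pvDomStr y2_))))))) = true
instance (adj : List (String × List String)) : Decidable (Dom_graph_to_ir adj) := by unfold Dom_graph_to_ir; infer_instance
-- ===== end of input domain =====

-- B replaces A's single loop threading a register dict, a counter and a lagging prev_reg by two
-- plain passes (collect the node order, then emit each line from its index); simpler, same cost.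
-- Both Pythons loop forever when the successor chain from "Input" is cyclic; Pre_ excludes exactly those inputs.


-- adj.get(curr, []) : first-match lookup in the adjacency dict (shared helper of both ports)
def nextsOf (adj : List (String × List String)) (curr : String) : List String :=
  ((PySem.Dict.mk adj).get? curr).getD []

-- ===== PORT A =====
-- A's while-True loop; fuel adj.length+1 suffices on every input where the Python loop terminates
-- (the walk visits distinct nodes, each non-final one a key of adj).
def irLoopA (adj : List (String × List String)) :
    Nat → PySem.Dict String String → List String → Int → String → String → List String
  | 0, _, ir, _, _, _ => ir
  | fuel+1, mapping, ir, counter, prevReg, curr =>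
    let fresh := (mapping.get? curr).isNone
    let mapping' := if fresh then mapping.insert curr ("%" ++ PySem.Int.toStr counter) else mapping
    let counter' := if fresh then counter + 1 else counter
    let reg := (mapping'.get? curr).getD ""
    let ir' := if fresh then
        ir ++ [if curr == "Input" then reg ++ " = " ++ curr ++ "()"
               else reg ++ " = " ++ curr ++ "(" ++ prevReg ++ ")"]
      else ir
    match nextsOf adj curr with
    | [] => ir'
    | n :: _ => irLoopA adj fuel mapping' ir' counter' reg n

def graph_to_ir (adj : List (String × List String)) : List String :=
  irLoopA adj (adj.length + 1) PySem.Dict.empty [] 1 "" "Input"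

-- ===== PORT B =====
-- first pass: collect the chain order (same fuel bound as A's loop)
def walkB (adj : List (String × List String)) : Nat → String → List String
  | 0, _ => []
  | fuel+1, curr =>
    match nextsOf adj curr with
    | [] => [curr]
    | n :: _ => curr :: walkB adj fuel n

-- second pass: emit the line for the node at index i, prev = register of the previous node
def emitB : List String → Nat → String → List String
  | [], _, _ => []
  | node :: rest, i, prev =>
    let reg := "%" ++ PySem.Int.toStr ((i : Int) + 1)
    (if node == "Input" then reg ++ " = " ++ node ++ "()"
     else reg ++ " = " ++ node ++ "(" ++ prev ++ ")") :: emitB rest (i + 1) reg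

def graph_to_ir_alt (adj : List (String × List String)) : List String :=
  emitB (walkB adj (adj.length + 1) "Input") 0 ""

-- ===== PRECONDITION & SPEC =====
-- Pre_'s own view of the graph (independent of both ports): the successor of a node is the first
-- entry of its adjacency row, and pvChain is the first-successor chain of the graph starting at a
-- node, cut off after n steps or at a sink (a node with no successors).
def pvSucc (adj : List (String × List String)) (v : String) : List String :=
  (((adj.find? (fun p => p.1 == v)).map Prod.snd).getD [])
def pvChain (adj : List (String × List String)) : Nat → String → List String
  | 0, _ => []
  | n+1, v =>
    match pvSucc adj v with
    | [] => [v]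
    | w :: _ => v :: pvChain adj n w

-- Pre_ excludes exactly the inputs on which A's while-loop never returns: the first-successor
-- chain from "Input" must reach a sink (within adj.length+1 nodes, which a terminating walk
-- always is) and never revisit a node.  On excluded inputs both Pythons loop forever.
def Pre_graph_to_ir (adj : List (String × List String)) : Prop :=
  (pvChain adj (adj.length + 1) "Input").Nodup ∧
  pvSucc adj ((pvChain adj (adj.length + 1) "Input").getLastD "") = []
instance (adj : List (String × List String)) : Decidable (Pre_graph_to_ir adj) := by
  unfold Pre_graph_to_ir; infer_instance

def pvWitness_graph_to_ir : (List (String × List String)) :=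
  [("Input", ["Dense"]), ("Dense", ["ReLU"])]

def Spec_graph_to_ir (adj : List (String × List String)) (out : List String) : Prop := out = graph_to_ir_alt adj
instance (adj : List (String × List String)) (out : List String) : Decidable (Spec_graph_to_ir adj out) := by unfold Spec_graph_to_ir; infer_instance

-- ===== CLAIM (what is proved, stated in full; the proofs are below) =====
def Claim_equal_graph_to_ir : Prop := ∀ (adj : List (String × List String)), Dom_graph_to_ir adj → Pre_graph_to_ir adj → Spec_graph_to_ir adj (graph_to_ir adj)

-- ===== LEMMAS AND PROOFS =====

-- Pre_'s graph chain coincides with B's first pass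
lemma pvSucc_eq_nextsOf (adj : List (String × List String)) (v : String) :
    pvSucc adj v = nextsOf adj v := by
  unfold pvSucc nextsOf
  induction adj with
  | nil => rfl
  | cons p t ih =>
    obtain ⟨k, vs⟩ := p
    rw [PySem.Dict.get?_mk_cons]
    by_cases h : k == v <;> simp [List.find?_cons, h, ih]

lemma pvChain_eq_walkB (adj : List (String × List String)) :
    ∀ (n : Nat) (v : String), pvChain adj n v = walkB adj n v := by
  intro n
  induction n with
  | zero => intro v; rfl
  | succ n ih =>
    intro v
    simp only [pvChain, walkB, pvSucc_eq_nextsOf]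
    cases nextsOf adj v <;> simp [ih]

lemma getLastD_irrel {α : Type} (l : List α) (d d' : α) (h : l ≠ []) :
    l.getLastD d = l.getLastD d' := by
  cases l with
  | nil => exact absurd rfl h
  | cons a t => rw [List.getLastD_cons, List.getLastD_cons]

lemma walkB_ne_nil (adj : List (String × List String)) (fuel : Nat) (curr : String)
    (h : 0 < fuel) : walkB adj fuel curr ≠ [] := by
  cases fuel with
  | zero => omega
  | succ f =>
    simp only [walkB]
    cases nextsOf adj curr <;> simp

lemma irLoopA_eq_emitB (adj : List (String × List String)) :
    ∀ (fuel : Nat) (curr : String) (mapping : PySem.Dict String String)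
      (ir : List String) (k : Nat) (prevReg : String),
    (walkB adj fuel curr).Nodup →
    nextsOf adj ((walkB adj fuel curr).getLastD "") = [] →
    0 < fuel →
    (∀ v ∈ walkB adj fuel curr, mapping.get? v = none) →
    irLoopA adj fuel mapping ir ((k : Int) + 1) prevReg curr
      = ir ++ emitB (walkB adj fuel curr) k prevReg := by
  intro fuel
  induction fuel with
  | zero => intro _ _ _ _ _ _ _ h; omega
  | succ fuel ih =>
    intro curr mapping ir k prevReg hnd hlast _ hfresh
    have hcurr : mapping.get? curr = none := by
      apply hfresh
      simp only [walkB]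
      cases nextsOf adj curr <;> simp
    cases hnx : nextsOf adj curr with
    | nil =>
      have hw : walkB adj (fuel + 1) curr = [curr] := by simp [walkB, hnx]
      simp only [irLoopA, hcurr, Option.isNone_none, if_true, hnx, hw, emitB,
        PySem.Dict.get?_insert_self, Option.getD_some]
    | cons n rest =>
      have hw : walkB adj (fuel + 1) curr = curr :: walkB adj fuel n := by
        simp [walkB, hnx]
      rw [hw] at hnd hlast hfresh
      have hfpos : 0 < fuel := by
        cases fuel with
        | zero =>
          exfalso
          simp [walkB, hnx] at hlast
        | succ f => omega
      have hne : walkB adj fuel n ≠ [] := walkB_ne_nil adj fuel n hfpos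
      have hlast' : nextsOf adj ((walkB adj fuel n).getLastD "") = [] := by
        rw [List.getLastD_cons, getLastD_irrel _ curr "" hne] at hlast
        exact hlast
      have hcne : curr ∉ walkB adj fuel n := (List.nodup_cons.mp hnd).1
      have hnd' : (walkB adj fuel n).Nodup := (List.nodup_cons.mp hnd).2
      have hreg : (PySem.Dict.get?
          (mapping.insert curr ("%" ++ PySem.Int.toStr ((k : Int) + 1))) curr)
          = some ("%" ++ PySem.Int.toStr ((k : Int) + 1)) :=
        PySem.Dict.get?_insert_self mapping curr _
      have hfresh' : ∀ v ∈ walkB adj fuel n,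
          (mapping.insert curr ("%" ++ PySem.Int.toStr ((k : Int) + 1))).get? v = none := by
        intro v hv
        rw [PySem.Dict.get?_insert_of_ne]
        · exact hfresh v (List.mem_cons_of_mem _ hv)
        · intro hveq; exact hcne (hveq ▸ hv)
      have hcast : ((k : Int) + 1) + 1 = ((k + 1 : Nat) : Int) + 1 := by push_cast; ring
      simp only [irLoopA, hcurr, Option.isNone_none, if_true, hnx, hreg, Option.getD_some]
      rw [hcast, ih n _ _ (k + 1) _ hnd' hlast' hfpos hfresh']
      simp [hw, emitB, List.append_assoc]

-- ===== VERDICT (by name: the statement is the Claim_ definition above) =====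
theorem graph_to_ir_spec : Claim_equal_graph_to_ir := by
  intro adj _ hpre
  unfold Spec_graph_to_ir graph_to_ir graph_to_ir_alt
  obtain ⟨h1, h2⟩ := hpre
  rw [pvChain_eq_walkB] at h1 h2
  rw [pvSucc_eq_nextsOf] at h2
  have h := irLoopA_eq_emitB adj (adj.length + 1) "Input" PySem.Dict.empty [] 0 ""
    h1 h2 (by omega) (by intro v _; exact PySem.Dict.get?_empty v)
  simpa using h
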